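-- pv_equiv track=rewrite | github.com/AG-Systems/programming-problems | google-foobar/minion_labor_shifts.py | answer
-- ===== SOURCE A (Python) =====
-- def answer(data,n):
--     hashmap = {}
--     if n == 0:
--         return []
--     for x in data:
--         if x in hashmap:
--             hashmap[x] += 1
--         else:
--             hashmap[x] = 1
--
--     for key, val in hashmap.items():
--         if val > n:
--             #data.remove(key)
--             data = [x for x in data if x != key]
--     return data
-- ===== SOURCE B (Python) =====
-- def answer(data, n):
--     return [x for x in data if data.count(x) <= n]
-- ===== Notes on version B (the rewrite author's own statement) =====
-- stated objective: idiomatic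
-- what changed: Replaced the n==0 guard, the frequency-dictionary build loop and the repeated whole-list filtering per over-frequent key by a single comprehension that keeps each element whose in-list count does not exceed n.
import Mathlib
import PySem

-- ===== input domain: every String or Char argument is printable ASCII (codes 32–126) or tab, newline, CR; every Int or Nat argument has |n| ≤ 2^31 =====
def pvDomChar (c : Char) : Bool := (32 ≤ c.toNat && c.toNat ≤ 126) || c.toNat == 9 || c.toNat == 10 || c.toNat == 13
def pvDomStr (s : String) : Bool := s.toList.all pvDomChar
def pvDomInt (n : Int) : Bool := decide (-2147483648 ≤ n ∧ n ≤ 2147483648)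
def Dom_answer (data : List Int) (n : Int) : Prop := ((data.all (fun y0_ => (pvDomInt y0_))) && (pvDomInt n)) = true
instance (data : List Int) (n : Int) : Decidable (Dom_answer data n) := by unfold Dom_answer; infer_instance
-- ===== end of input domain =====

-- B replaces A's frequency-dictionary build plus repeated per-key filtering with one
-- comprehension keeping elements whose in-list count does not exceed n (idiomatic).

-- ===== PORT A =====
def answer (data : List Int) (n : Int) : List Int :=
  if n = 0 then []
  else
    -- for x in data: if x in hashmap: hashmap[x] += 1 else: hashmap[x] = 1
    let hashmap : PySem.Dict Int Int :=
      data.foldl (fun h x =>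
        if h.contains x then h.modify x 0 (· + 1) else h.insert x 1)
        PySem.Dict.empty
    -- for key, val in hashmap.items(): if val > n: data = [x for x in data if x != key]
    hashmap.items.foldl (fun d kv =>
      if kv.2 > n then d.filter (fun x => x != kv.1) else d) data

-- ===== PORT B =====
def answer_alt (data : List Int) (n : Int) : List Int :=
  data.filter (fun x => decide ((data.count x : Int) ≤ n))

-- ===== PRECONDITION & SPEC =====
def Spec_answer (data : List Int) (n : Int) (out : List Int) : Prop := out = answer_alt data n
instance (data : List Int) (n : Int) (out : List Int) : Decidable (Spec_answer data n out) := by unfold Spec_answer; infer_instance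

-- ===== CLAIM (what is proved, stated in full; the proofs are below) =====
def Claim_equal_answer : Prop := ∀ (data : List Int) (n : Int), Dom_answer data n → Spec_answer data n (answer data n)

-- ===== LEMMAS AND PROOFS =====

-- A's build step is exactly the Counter step: when the key is absent, modify inserts 1.
theorem build_step_eq (h : PySem.Dict Int Int) (x : Int) :
    (if h.contains x then h.modify x 0 (· + 1) else h.insert x 1) = h.modify x 0 (· + 1) := by
  by_cases hc : h.contains x = true
  · simp [hc]
  · have hg : h.get? x = none := by
      cases hgg : h.get? x with
      | none => rfl
      | some v =>
          exfalso
          simp [PySem.Dict.contains] at hc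
          simp [PySem.Dict.get?] at hgg
          obtain ⟨a, hf⟩ := hgg
          have hm := List.mem_of_find?_eq_some hf
          have ha := List.find?_some hf
          simp at ha
          subst ha
          exact hc v hm
    simp [hc, PySem.Dict.modify, PySem.Dict.getD, hg]

-- folding per-key filters = one filter with the conjunction of the surviving predicates
theorem foldl_filter_eq (P : Int → Prop) [DecidablePred P] (ks : List Int) (l : List Int) :
    ks.foldl (fun d k => if P k then d.filter (fun x => x != k) else d) l
      = l.filter (fun x => ks.all (fun k => !(decide (P k) && x == k))) := by
  induction ks generalizing l with
  | nil => simp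
  | cons k ks ih =>
      simp only [List.foldl_cons]
      by_cases hp : P k
      · rw [if_pos hp, ih, List.filter_filter]
        apply List.filter_congr
        intro x _
        by_cases hx : x = k <;> simp [hx, hp, bne, Bool.and_comm]
      · rw [if_neg hp, ih]
        apply List.filter_congr
        intro x _
        simp [hp]

theorem answer_eq_filter (data : List Int) (n : Int) (hn : n ≠ 0) :
    answer data n = data.filter (fun x => decide ((data.count x : Int) ≤ n)) := by
  unfold answer
  rw [if_neg hn]
  have hbuild : data.foldl (fun h x =>
      if h.contains x then h.modify x 0 (· + 1) else h.insert x 1) PySem.Dict.empty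
      = PySem.Dict.counter data := by
    rw [PySem.Dict.counter_eq_foldl]
    simp only [build_step_eq]
  simp only [hbuild, PySem.Dict.items_counter]
  rw [List.foldl_map]
  rw [foldl_filter_eq (fun k => ((data.count k : Int) > n)) (PySem.Set.ofList data) data]
  apply List.filter_congr
  intro x hx
  have hmem : x ∈ PySem.Set.ofList data := by
    rw [PySem.Set.mem_ofList]; exact hx
  rw [Bool.eq_iff_iff]
  simp only [List.all_eq_true, decide_eq_true_eq]
  constructor
  · intro hall
    have h2 := hall x hmem
    simp at h2
    omega
  · intro hle k _
    by_cases hk : x = k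
    · subst hk; simp; omega
    · simp [hk]

theorem answer_zero_eq (data : List Int) : answer_alt data 0 = [] := by
  unfold answer_alt
  rw [List.filter_eq_nil_iff]
  intro x hx
  have : 1 ≤ data.count x := List.one_le_count_iff.mpr hx
  simp only [decide_eq_true_eq]
  omega

-- ===== VERDICT (by name: the statement is the Claim_ definition above) =====
theorem answer_spec : Claim_equal_answer := by
  intro data n _
  unfold Spec_answer
  by_cases hn : n = 0
  · subst hn
    rw [answer_zero_eq]
    simp [answer]
  · rw [answer_eq_filter data n hn]
    rfl
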